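-- pv_equiv track=rewrite | github.com/MaksNemanja/POO_project | ai.py | premiere_occurrence
-- ===== SOURCE A (Python) =====
-- def premiere_occurrence(matrix,n):   #methode pour savoir la position de mes checkpoint sur la map
--     premier_C = None
--     premier_D = None
--     premier_E = None
--     premier_F = None
--
--     for i in range(len(matrix)):
--         for j in range(len(matrix[0])):
--             if matrix[i][j] == 'C' and premier_C is None:
--                 y=i//n
--                 x=j//n
--                 premier_C = [y, x]
--             elif matrix[i][j] == 'D' and premier_D is None:
--                 y=i//n
--                 x=j//n
--                 premier_D = [y, x]
--             elif matrix[i][j] == 'E' and premier_E is None: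
--                 y=i//n
--                 x=j//n
--                 premier_E = [y, x]
--             elif matrix[i][j] == 'F' and premier_F is None:
--                 y=i//n
--                 x=j//n
--                 premier_F = [y, x]
--     checkpoints = [premier_C, premier_D, premier_E, premier_F]
--     return checkpoints
-- ===== SOURCE B (Python) =====
-- def premiere_occurrence(matrix, n):
--     def find_first(matrix, target):
--         if not matrix:
--             return None
--         w = len(matrix[0])
--         i = 0
--         for row in matrix:
--             for j in range(w):
--                 if row[j] == target:
--                     return [i // n, j // n]
--             i += 1
--         return None
--     return [find_first(matrix, 'C'), find_first(matrix, 'D'),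
--             find_first(matrix, 'E'), find_first(matrix, 'F')]
-- ===== Notes on version B (the rewrite author's own statement) =====
-- stated objective: alternative
-- what changed: Replaced the single combined pass that threads four premier_* state variables through an elif chain with a generic find_first helper (row-major scan with early return) applied independently to each of the four markers.
import Mathlib
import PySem

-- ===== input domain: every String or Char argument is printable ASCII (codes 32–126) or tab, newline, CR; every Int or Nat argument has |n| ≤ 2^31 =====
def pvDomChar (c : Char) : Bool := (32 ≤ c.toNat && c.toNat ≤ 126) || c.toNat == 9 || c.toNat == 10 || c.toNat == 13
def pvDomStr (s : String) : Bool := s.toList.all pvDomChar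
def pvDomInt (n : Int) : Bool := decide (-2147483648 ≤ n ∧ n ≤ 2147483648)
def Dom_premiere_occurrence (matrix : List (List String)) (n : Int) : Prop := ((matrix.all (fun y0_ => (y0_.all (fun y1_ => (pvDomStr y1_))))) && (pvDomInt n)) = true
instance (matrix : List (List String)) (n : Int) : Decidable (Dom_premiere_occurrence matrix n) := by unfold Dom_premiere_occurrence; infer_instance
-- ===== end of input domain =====

-- B replaces A's single combined four-variable pass by a generic find_first helper applied
-- independently to each of the four markers (alternative decomposition, no speed claim).

-- ===== PORT A =====
-- matrix[i][j] is ported with getD (in range on every input Pre_ admits); i//n, j//n via PySem.Int.floordiv.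
def premiere_occurrence (matrix : List (List String)) (n : Int) : List (Option (List Int)) :=
  let st :=
    (List.range matrix.length).foldl (fun st i =>
      (List.range (matrix.headD []).length).foldl (fun st j =>
        let cell := (matrix.getD i []).getD j ""
        if cell = "C" ∧ st.1 = none then
          (some [PySem.Int.floordiv (Int.ofNat i) n, PySem.Int.floordiv (Int.ofNat j) n], st.2.1, st.2.2.1, st.2.2.2)
        else if cell = "D" ∧ st.2.1 = none then
          (st.1, some [PySem.Int.floordiv (Int.ofNat i) n, PySem.Int.floordiv (Int.ofNat j) n], st.2.2.1, st.2.2.2)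
        else if cell = "E" ∧ st.2.2.1 = none then
          (st.1, st.2.1, some [PySem.Int.floordiv (Int.ofNat i) n, PySem.Int.floordiv (Int.ofNat j) n], st.2.2.2)
        else if cell = "F" ∧ st.2.2.2 = none then
          (st.1, st.2.1, st.2.2.1, some [PySem.Int.floordiv (Int.ofNat i) n, PySem.Int.floordiv (Int.ofNat j) n])
        else st) st)
      ((none, none, none, none) : Option (List Int) × Option (List Int) × Option (List Int) × Option (List Int))
  [st.1, st.2.1, st.2.2.1, st.2.2.2]

-- ===== PORT B =====
-- inner loop of find_first: first j < w with row[j] == target (row[j] via getD, in range under Pre_)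
def pvFindRow (row : List String) (w : Nat) (target : String) : Option Nat :=
  (List.range w).find? (fun j => row.getD j "" == target)

-- outer loop of find_first with early return, i the running row index
def pvFindRows (rows : List (List String)) (i : Nat) (w : Nat) (target : String) (n : Int) : Option (List Int) :=
  match rows with
  | [] => none
  | row :: rest =>
    match pvFindRow row w target with
    | some j => some [PySem.Int.floordiv (Int.ofNat i) n, PySem.Int.floordiv (Int.ofNat j) n]
    | none => pvFindRows rest (i + 1) w target n

def pvFindFirst (matrix : List (List String)) (target : String) (n : Int) : Option (List Int) :=
  match matrix with
  | [] => none
  | _ :: _ => pvFindRows matrix 0 (matrix.headD []).length target n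

def premiere_occurrence_alt (matrix : List (List String)) (n : Int) : List (Option (List Int)) :=
  [pvFindFirst matrix "C" n, pvFindFirst matrix "D" n, pvFindFirst matrix "E" n, pvFindFirst matrix "F" n]

-- ===== PRECONDITION & SPEC =====
-- Pre_ excludes exactly the inputs where Python A raises: ragged matrices with some row shorter
-- than the first (IndexError at matrix[i][j]) and n = 0 when a marker occurs in the scanned
-- rectangle (ZeroDivisionError at i//n); on every other input A returns normally.
def Pre_premiere_occurrence (matrix : List (List String)) (n : Int) : Prop :=
  (∀ row ∈ matrix, (matrix.headD []).length ≤ row.length) ∧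
  (n ≠ 0 ∨ ∀ row ∈ matrix, ∀ s ∈ row.take (matrix.headD []).length,
      s ≠ "C" ∧ s ≠ "D" ∧ s ≠ "E" ∧ s ≠ "F")
instance (matrix : List (List String)) (n : Int) : Decidable (Pre_premiere_occurrence matrix n) := by
  unfold Pre_premiere_occurrence; infer_instance

def pvWitness_premiere_occurrence : List (List String) × Int := ([["C", "x"], ["y", "D"]], 2)

def Spec_premiere_occurrence (matrix : List (List String)) (n : Int) (out : List (Option (List Int))) : Prop := out = premiere_occurrence_alt matrix n
instance (matrix : List (List String)) (n : Int) (out : List (Option (List Int))) : Decidable (Spec_premiere_occurrence matrix n out) := by unfold Spec_premiere_occurrence; infer_instance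

-- ===== CLAIM (what is proved, stated in full; the proofs are below) =====
def Claim_equal_premiere_occurrence : Prop := ∀ (matrix : List (List String)) (n : Int), Dom_premiere_occurrence matrix n → Pre_premiere_occurrence matrix n → Spec_premiere_occurrence matrix n (premiere_occurrence matrix n)

-- ===== LEMMAS AND PROOFS =====

-- single-target update of one state component
def pvUpd (cell t : String) (v : List Int) (a : Option (List Int)) : Option (List Int) :=
  if cell = t ∧ a = none then some v else a

-- per-target effect of one whole row of A's scan
def pvRowStep (matrix : List (List String)) (n : Int) (t : String)
    (a : Option (List Int)) (i : Nat) : Option (List Int) :=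
  match a with
  | some y => some y
  | none =>
      ((List.range (matrix.headD []).length).find?
        (fun j => (matrix.getD i []).getD j "" == t)).map
        (fun j => [PySem.Int.floordiv (Int.ofNat i) n, PySem.Int.floordiv (Int.ofNat j) n])

-- A's elif chain acts on the four components independently
theorem pvStep_eq (cell : String) (v : List Int)
    (st : Option (List Int) × Option (List Int) × Option (List Int) × Option (List Int)) :
    (if cell = "C" ∧ st.1 = none then (some v, st.2.1, st.2.2.1, st.2.2.2)
     else if cell = "D" ∧ st.2.1 = none then (st.1, some v, st.2.2.1, st.2.2.2)
     else if cell = "E" ∧ st.2.2.1 = none then (st.1, st.2.1, some v, st.2.2.2)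
     else if cell = "F" ∧ st.2.2.2 = none then (st.1, st.2.1, st.2.2.1, some v)
     else st)
    = (pvUpd cell "C" v st.1, pvUpd cell "D" v st.2.1, pvUpd cell "E" v st.2.2.1, pvUpd cell "F" v st.2.2.2) := by
  obtain ⟨c, d, e, f⟩ := st
  simp only [pvUpd]
  by_cases hC : cell = "C"
  · subst hC; cases c <;> simp
  · by_cases hD : cell = "D"
    · subst hD; cases d <;> simp [hC]
    · by_cases hE : cell = "E"
      · subst hE; cases e <;> simp [hC, hD]
      · by_cases hF : cell = "F"
        · subst hF; cases f <;> simp [hC, hD, hE]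
        · simp [hC, hD, hE, hF]

-- A's inner (column) fold splits into four independent single-target folds
theorem pvInner_quad (matrix : List (List String)) (n : Int) (i : Nat) :
    ∀ (l : List Nat) (st : Option (List Int) × Option (List Int) × Option (List Int) × Option (List Int)),
      l.foldl (fun st j =>
        let cell := (matrix.getD i []).getD j ""
        if cell = "C" ∧ st.1 = none then
          (some [PySem.Int.floordiv (Int.ofNat i) n, PySem.Int.floordiv (Int.ofNat j) n], st.2.1, st.2.2.1, st.2.2.2)
        else if cell = "D" ∧ st.2.1 = none then
          (st.1, some [PySem.Int.floordiv (Int.ofNat i) n, PySem.Int.floordiv (Int.ofNat j) n], st.2.2.1, st.2.2.2)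
        else if cell = "E" ∧ st.2.2.1 = none then
          (st.1, st.2.1, some [PySem.Int.floordiv (Int.ofNat i) n, PySem.Int.floordiv (Int.ofNat j) n], st.2.2.2)
        else if cell = "F" ∧ st.2.2.2 = none then
          (st.1, st.2.1, st.2.2.1, some [PySem.Int.floordiv (Int.ofNat i) n, PySem.Int.floordiv (Int.ofNat j) n])
        else st) st
      = (l.foldl (fun a j => pvUpd ((matrix.getD i []).getD j "") "C" [PySem.Int.floordiv (Int.ofNat i) n, PySem.Int.floordiv (Int.ofNat j) n] a) st.1,
         l.foldl (fun a j => pvUpd ((matrix.getD i []).getD j "") "D" [PySem.Int.floordiv (Int.ofNat i) n, PySem.Int.floordiv (Int.ofNat j) n] a) st.2.1,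
         l.foldl (fun a j => pvUpd ((matrix.getD i []).getD j "") "E" [PySem.Int.floordiv (Int.ofNat i) n, PySem.Int.floordiv (Int.ofNat j) n] a) st.2.2.1,
         l.foldl (fun a j => pvUpd ((matrix.getD i []).getD j "") "F" [PySem.Int.floordiv (Int.ofNat i) n, PySem.Int.floordiv (Int.ofNat j) n] a) st.2.2.2) := by
  intro l
  induction l with
  | nil => intro st; obtain ⟨c, d, e, f⟩ := st; rfl
  | cons x xs ih =>
    intro st
    simp only [List.foldl_cons]
    rw [pvStep_eq]
    rw [ih]

-- a single-target pvUpd fold computes the first match (= pvRowStep when l = range w)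
theorem pvRowFold_aux (n : Int) (i : Nat) (t : String) (g : Nat → String) :
    ∀ (l : List Nat) (a : Option (List Int)),
      l.foldl (fun a j => pvUpd (g j) t [PySem.Int.floordiv (Int.ofNat i) n, PySem.Int.floordiv (Int.ofNat j) n] a) a
      = (match a with
         | some y => some y
         | none => (l.find? (fun j => g j == t)).map
             (fun j => [PySem.Int.floordiv (Int.ofNat i) n, PySem.Int.floordiv (Int.ofNat j) n])) := by
  intro l
  induction l with
  | nil => intro a; cases a <;> rfl
  | cons x xs ih =>
    intro a
    rw [List.foldl_cons]
    cases a with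
    | some y =>
      have hacc : pvUpd (g x) t [PySem.Int.floordiv (Int.ofNat i) n, PySem.Int.floordiv (Int.ofNat x) n] (some y) = some y := by
        simp [pvUpd]
      rw [hacc, ih]
    | none =>
      by_cases h : g x = t
      · have hacc : pvUpd (g x) t [PySem.Int.floordiv (Int.ofNat i) n, PySem.Int.floordiv (Int.ofNat x) n] none
            = some [PySem.Int.floordiv (Int.ofNat i) n, PySem.Int.floordiv (Int.ofNat x) n] := by
          simp [pvUpd, h]
        rw [hacc, ih, List.find?_cons_of_pos (by simp [h])]
        rfl
      · have hacc : pvUpd (g x) t [PySem.Int.floordiv (Int.ofNat i) n, PySem.Int.floordiv (Int.ofNat x) n] none = none := by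
          simp [pvUpd, h]
        rw [hacc, ih, List.find?_cons_of_neg (by simp [h])]

theorem pvRowFold (matrix : List (List String)) (n : Int) (i : Nat) (t : String) (a : Option (List Int)) :
    (List.range (matrix.headD []).length).foldl
      (fun a j => pvUpd ((matrix.getD i []).getD j "") t [PySem.Int.floordiv (Int.ofNat i) n, PySem.Int.floordiv (Int.ofNat j) n] a) a
    = pvRowStep matrix n t a i := by
  rw [pvRowFold_aux n i t (fun j => (matrix.getD i []).getD j "")]
  cases a <;> rfl

-- A's outer (row) fold splits into four independent pvRowStep folds
theorem pvOuter_quad (matrix : List (List String)) (n : Int) :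
    ∀ (l : List Nat) (st : Option (List Int) × Option (List Int) × Option (List Int) × Option (List Int)),
      l.foldl (fun st i =>
        (pvRowStep matrix n "C" st.1 i, pvRowStep matrix n "D" st.2.1 i,
         pvRowStep matrix n "E" st.2.2.1 i, pvRowStep matrix n "F" st.2.2.2 i)) st
      = (l.foldl (pvRowStep matrix n "C") st.1, l.foldl (pvRowStep matrix n "D") st.2.1,
         l.foldl (pvRowStep matrix n "E") st.2.2.1, l.foldl (pvRowStep matrix n "F") st.2.2.2) := by
  intro l
  induction l with
  | nil => intro st; obtain ⟨c, d, e, f⟩ := st; rfl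
  | cons x xs ih =>
    intro st
    simp only [List.foldl_cons]
    rw [ih]

-- A's whole scan, per target
theorem pvA_eq (matrix : List (List String)) (n : Int) :
    premiere_occurrence matrix n
      = [(List.range matrix.length).foldl (pvRowStep matrix n "C") none,
         (List.range matrix.length).foldl (pvRowStep matrix n "D") none,
         (List.range matrix.length).foldl (pvRowStep matrix n "E") none,
         (List.range matrix.length).foldl (pvRowStep matrix n "F") none] := by
  have hbody : (fun (st : Option (List Int) × Option (List Int) × Option (List Int) × Option (List Int)) (i : Nat) =>
      (List.range (matrix.headD []).length).foldl (fun st j =>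
        let cell := (matrix.getD i []).getD j ""
        if cell = "C" ∧ st.1 = none then
          (some [PySem.Int.floordiv (Int.ofNat i) n, PySem.Int.floordiv (Int.ofNat j) n], st.2.1, st.2.2.1, st.2.2.2)
        else if cell = "D" ∧ st.2.1 = none then
          (st.1, some [PySem.Int.floordiv (Int.ofNat i) n, PySem.Int.floordiv (Int.ofNat j) n], st.2.2.1, st.2.2.2)
        else if cell = "E" ∧ st.2.2.1 = none then
          (st.1, st.2.1, some [PySem.Int.floordiv (Int.ofNat i) n, PySem.Int.floordiv (Int.ofNat j) n], st.2.2.2)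
        else if cell = "F" ∧ st.2.2.2 = none then
          (st.1, st.2.1, st.2.2.1, some [PySem.Int.floordiv (Int.ofNat i) n, PySem.Int.floordiv (Int.ofNat j) n])
        else st) st)
    = (fun st i =>
        (pvRowStep matrix n "C" st.1 i, pvRowStep matrix n "D" st.2.1 i,
         pvRowStep matrix n "E" st.2.2.1 i, pvRowStep matrix n "F" st.2.2.2 i)) := by
    funext st i
    rw [pvInner_quad]
    rw [pvRowFold, pvRowFold, pvRowFold, pvRowFold]
  simp only [premiere_occurrence]
  rw [hbody, pvOuter_quad]

theorem pvKeepSome (matrix : List (List String)) (n : Int) (t : String) (v : List Int) :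
    ∀ (l : List Nat), l.foldl (pvRowStep matrix n t) (some v) = some v := by
  intro l
  induction l with
  | nil => rfl
  | cons x xs ih => simpa [List.foldl_cons, pvRowStep] using ih

-- B's early-return recursion equals A's per-target row fold, from any starting row
theorem pvB_eq (matrix : List (List String)) (n : Int) (t : String) :
    ∀ (rows : List (List String)) (k : Nat), matrix.drop k = rows →
      (List.range' k rows.length).foldl (pvRowStep matrix n t) none
        = pvFindRows rows k (matrix.headD []).length t n := by
  intro rows
  induction rows with
  | nil => intro k _; rfl
  | cons row rest ih =>
    intro k hk
    have hget : matrix.getD k [] = row := by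
      have h0 : matrix[k]? = some row := by
        have h := congrArg (fun l => l[0]?) hk
        simpa [List.getElem?_drop] using h
      simp [List.getD, h0]
    have hdrop : matrix.drop (k + 1) = rest := by
      have h : matrix.drop (k + 1) = (matrix.drop k).drop 1 := by
        rw [List.drop_drop]
      rw [h, hk]; rfl
    rw [show (row :: rest).length = rest.length + 1 from rfl, List.range'_succ, List.foldl_cons]
    have hrow : pvRowStep matrix n t none k
        = (pvFindRow row (matrix.headD []).length t).map
            (fun j => [PySem.Int.floordiv (Int.ofNat k) n, PySem.Int.floordiv (Int.ofNat j) n]) := by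
      simp only [pvRowStep, pvFindRow]
      rw [hget]
    cases hfind : pvFindRow row (matrix.headD []).length t with
    | some j =>
      rw [hrow, hfind, Option.map_some, pvKeepSome]
      simp only [pvFindRows]
      rw [hfind]
    | none =>
      rw [hrow, hfind, Option.map_none, ih (k + 1) hdrop]
      simp only [pvFindRows]
      rw [hfind]

theorem pvComponent_eq (matrix : List (List String)) (n : Int) (t : String) :
    (List.range matrix.length).foldl (pvRowStep matrix n t) none = pvFindFirst matrix t n := by
  cases matrix with
  | nil => rfl
  | cons r rs =>
    rw [List.range_eq_range', pvB_eq (r :: rs) n t (r :: rs) 0 rfl]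
    rfl

-- ===== VERDICT (by name: the statement is the Claim_ definition above) =====
theorem premiere_occurrence_spec : Claim_equal_premiere_occurrence := by
  intro matrix n _ _
  unfold Spec_premiere_occurrence premiere_occurrence_alt
  rw [pvA_eq]
  rw [pvComponent_eq, pvComponent_eq, pvComponent_eq, pvComponent_eq]
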